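-- pv_equiv track=rewrite | github.com/sunnytroo01/cortex-agi | data/build_corpus.py | build_word_sections
-- ===== SOURCE A (Python) =====
-- def build_word_sections(words):
--     """Build word training data organized by length, frequency, and letter."""
--     sections = []
--
--     # Section: All words listed (exposure)
--     sections.append("SECTION: ENGLISH VOCABULARY\n" + "=" * 40 + "\n")
--     for i in range(0, len(words), 20):
--         batch = words[i:i+20]
--         sections.append(" ".join(batch) + ".\n")
--
--     # Section: Words by first letter
--     sections.append("\nSECTION: WORDS BY LETTER\n" + "=" * 40 + "\n")
--     for letter in "abcdefghijklmnopqrstuvwxyz":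
--         letter_words = [w for w in words[:10000] if w.startswith(letter)][:50]
--         if letter_words:
--             sections.append(f"\nWords starting with {letter.upper()}: {', '.join(letter_words)}.\n")
--
--     # Section: Words by length
--     sections.append("\nSECTION: WORDS BY LENGTH\n" + "=" * 40 + "\n")
--     for length in range(1, 16):
--         length_words = [w for w in words[:20000] if len(w) == length][:30]
--         if length_words:
--             sections.append(f"\n{length}-letter words: {', '.join(length_words)}.\n")
--
--     # Section: Common word pairs and collocations
--     sections.append("\nSECTION: COMMON WORD PAIRS\n" + "=" * 40 + "\n")
--     pairs = [
--         "the world", "of the", "in the", "to the", "and the",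
--         "a good", "a great", "a new", "a long", "a small",
--         "very good", "very much", "very well", "very long", "very large",
--         "do not", "can not", "will not", "should not", "could not",
--         "has been", "have been", "had been", "will be", "would be",
--         "each other", "one another", "as well", "so much", "too much",
--         "right now", "just now", "even though", "as if", "such as",
--         "more than", "less than", "rather than", "other than", "better than",
--     ]
--     for p in pairs:
--         sections.append(f"{p}. {p}. {p}.\n")
--
--     return "".join(sections)
-- ===== SOURCE B (Python) =====
-- LETTERS = "abcdefghijklmnopqrstuvwxyz"
--
-- PAIRS = [
--     "the world", "of the", "in the", "to the", "and the",
--     "a good", "a great", "a new", "a long", "a small",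
--     "very good", "very much", "very well", "very long", "very large",
--     "do not", "can not", "will not", "should not", "could not",
--     "has been", "have been", "had been", "will be", "would be",
--     "each other", "one another", "as well", "so much", "too much",
--     "right now", "just now", "even though", "as if", "such as",
--     "more than", "less than", "rather than", "other than", "better than",
-- ]
--
--
-- def build_word_sections(words):
--     """Build word training data organized by length, frequency, and letter."""
--     sections = ["SECTION: ENGLISH VOCABULARY\n" + "=" * 40 + "\n"]
--     for i in range(0, len(words), 20):
--         sections.append(" ".join(words[i:i+20]) + ".\n")
--
--     # One pass per source window: bucket by first letter / by length, capped.
--     by_letter = {c: [] for c in LETTERS}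
--     for w in words[:10000]:
--         if w and 'a' <= w[0] <= 'z' and len(by_letter[w[0]]) < 50:
--             by_letter[w[0]].append(w)
--
--     by_length = {n: [] for n in range(1, 16)}
--     for w in words[:20000]:
--         n = len(w)
--         if 1 <= n <= 15 and len(by_length[n]) < 30:
--             by_length[n].append(w)
--
--     sections.append("\nSECTION: WORDS BY LETTER\n" + "=" * 40 + "\n")
--     for c in LETTERS:
--         if by_letter[c]:
--             sections.append(f"\nWords starting with {c.upper()}: {', '.join(by_letter[c])}.\n")
--
--     sections.append("\nSECTION: WORDS BY LENGTH\n" + "=" * 40 + "\n")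
--     for n in range(1, 16):
--         if by_length[n]:
--             sections.append(f"\n{n}-letter words: {', '.join(by_length[n])}.\n")
--
--     sections.append("\nSECTION: COMMON WORD PAIRS\n" + "=" * 40 + "\n")
--     for p in PAIRS:
--         sections.append(f"{p}. {p}. {p}.\n")
--
--     return "".join(sections)
-- ===== Notes on version B (the rewrite author's own statement) =====
-- stated objective: alternative
-- what changed: The 26 per-letter scans and 15 per-length scans over the word-prefix windows are replaced by one capped bucketing pass per window (a dict of first-letter buckets and a dict of length buckets), emitted afterwards in letter/length order.
import Mathlib
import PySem

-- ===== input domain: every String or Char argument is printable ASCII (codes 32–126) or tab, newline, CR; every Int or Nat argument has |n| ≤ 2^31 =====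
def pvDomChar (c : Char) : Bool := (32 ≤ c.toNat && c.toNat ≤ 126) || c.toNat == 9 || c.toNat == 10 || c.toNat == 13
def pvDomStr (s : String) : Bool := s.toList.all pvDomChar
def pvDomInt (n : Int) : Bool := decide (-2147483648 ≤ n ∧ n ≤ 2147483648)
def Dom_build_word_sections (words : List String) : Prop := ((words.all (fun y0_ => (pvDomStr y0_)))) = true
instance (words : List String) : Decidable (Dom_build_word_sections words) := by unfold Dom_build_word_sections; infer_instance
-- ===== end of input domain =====

-- B replaces A's 26+15 repeated scans of the word prefix by one capped bucketing pass per window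
-- (first-letter buckets and length buckets), emitted afterwards in letter/length order (alternative decomposition).

-- shared literal constants
def pvEq40 : String := String.ofList (List.replicate 40 '=')
def pvLetters : List Char := ['a','b','c','d','e','f','g','h','i','j','k','l','m','n','o','p','q','r','s','t','u','v','w','x','y','z']
def pvPairs : List String := [
    "the world", "of the", "in the", "to the", "and the",
    "a good", "a great", "a new", "a long", "a small",
    "very good", "very much", "very well", "very long", "very large",
    "do not", "can not", "will not", "should not", "could not",
    "has been", "have been", "had been", "will be", "would be",
    "each other", "one another", "as well", "so much", "too much",
    "right now", "just now", "even though", "as if", "such as",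
    "more than", "less than", "rather than", "other than", "better than"]

-- ===== PORT A =====
def build_word_sections (words : List String) : String :=
  let sections : List String := []
  let sections := sections ++ ["SECTION: ENGLISH VOCABULARY\n" ++ pvEq40 ++ "\n"]
  let sections := (PySem.List.pyRange 0 (PySem.List.len words) 20).foldl (fun secs i =>
      let batch := PySem.List.slice words (some i) (some (i + 20))
      secs ++ [PySem.Str.join " " batch ++ ".\n"]) sections
  let sections := sections ++ ["\nSECTION: WORDS BY LETTER\n" ++ pvEq40 ++ "\n"]
  let sections := pvLetters.foldl (fun secs letter =>
      let letter_words := PySem.List.slice ((PySem.List.slice words none (some 10000)).filter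
          (fun w => PySem.Str.startswith w (String.ofList [letter]))) none (some 50)
      if letter_words ≠ [] then
        secs ++ ["\nWords starting with " ++ PySem.Str.upper (String.ofList [letter]) ++ ": " ++
                 PySem.Str.join ", " letter_words ++ ".\n"]
      else secs) sections
  let sections := sections ++ ["\nSECTION: WORDS BY LENGTH\n" ++ pvEq40 ++ "\n"]
  let sections := (PySem.List.pyRange 1 16 1).foldl (fun secs length =>
      let length_words := PySem.List.slice ((PySem.List.slice words none (some 20000)).filter
          (fun w => PySem.Str.len w == length)) none (some 30)
      if length_words ≠ [] then
        secs ++ ["\n" ++ PySem.Int.toStr length ++ "-letter words: " ++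
                 PySem.Str.join ", " length_words ++ ".\n"]
      else secs) sections
  let sections := sections ++ ["\nSECTION: COMMON WORD PAIRS\n" ++ pvEq40 ++ "\n"]
  let sections := pvPairs.foldl (fun secs p => secs ++ [p ++ ". " ++ p ++ ". " ++ p ++ ".\n"]) sections
  PySem.Str.join "" sections

-- ===== PORT B =====
-- one pass over words[:10000]: first-letter buckets, cap 50 ('if w and 'a' <= w[0] <= 'z' …')
def pvByLetter (words : List String) : PySem.Dict Char (List String) :=
  (PySem.List.slice words none (some 10000)).foldl
    (fun d w =>
      match w.toList with
      | [] => d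
      | c :: _ =>
        if ('a' ≤ c ∧ c ≤ 'z') ∧ (d.getD c []).length < 50 then
          d.insert c (d.getD c [] ++ [w])
        else d)
    (pvLetters.foldl (fun d c => d.insert c ([] : List String)) PySem.Dict.empty)

-- one pass over words[:20000]: length buckets, cap 30
def pvByLength (words : List String) : PySem.Dict Int (List String) :=
  (PySem.List.slice words none (some 20000)).foldl
    (fun d w =>
      let n := PySem.Str.len w
      if (1 ≤ n ∧ n ≤ 15) ∧ (d.getD n []).length < 30 then
        d.insert n (d.getD n [] ++ [w])
      else d)
    ((PySem.List.pyRange 1 16 1).foldl (fun d n => d.insert n ([] : List String)) PySem.Dict.empty)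

def build_word_sections_alt (words : List String) : String :=
  let sections : List String := ["SECTION: ENGLISH VOCABULARY\n" ++ pvEq40 ++ "\n"]
  let sections := (PySem.List.pyRange 0 (PySem.List.len words) 20).foldl (fun secs i =>
      secs ++ [PySem.Str.join " " (PySem.List.slice words (some i) (some (i + 20))) ++ ".\n"]) sections
  let byLetter := pvByLetter words
  let byLength := pvByLength words
  let sections := sections ++ ["\nSECTION: WORDS BY LETTER\n" ++ pvEq40 ++ "\n"]
  let sections := pvLetters.foldl (fun secs c =>
      if byLetter.getD c [] ≠ [] then
        secs ++ ["\nWords starting with " ++ PySem.Str.upper (String.ofList [c]) ++ ": " ++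
                 PySem.Str.join ", " (byLetter.getD c []) ++ ".\n"]
      else secs) sections
  let sections := sections ++ ["\nSECTION: WORDS BY LENGTH\n" ++ pvEq40 ++ "\n"]
  let sections := (PySem.List.pyRange 1 16 1).foldl (fun secs n =>
      if byLength.getD n [] ≠ [] then
        secs ++ ["\n" ++ PySem.Int.toStr n ++ "-letter words: " ++
                 PySem.Str.join ", " (byLength.getD n []) ++ ".\n"]
      else secs) sections
  let sections := sections ++ ["\nSECTION: COMMON WORD PAIRS\n" ++ pvEq40 ++ "\n"]
  let sections := pvPairs.foldl (fun secs p => secs ++ [p ++ ". " ++ p ++ ". " ++ p ++ ".\n"]) sections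
  PySem.Str.join "" sections

-- ===== PRECONDITION & SPEC =====
def Spec_build_word_sections (words : List String) (out : String) : Prop := out = build_word_sections_alt words
instance (words : List String) (out : String) : Decidable (Spec_build_word_sections words out) := by unfold Spec_build_word_sections; infer_instance

-- ===== CLAIM (what is proved, stated in full; the proofs are below) =====
def Claim_equal_build_word_sections : Prop := ∀ (words : List String), Dom_build_word_sections words → Spec_build_word_sections words (build_word_sections words)

-- ===== LEMMAS AND PROOFS =====

-- a capped append-fold is take (cap - |acc|) of the filter
theorem pvCapFold (p : String → Prop) [DecidablePred p] (cap : Nat) :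
    ∀ (ws acc : List String), acc.length ≤ cap →
      ws.foldl (fun acc w => if p w ∧ acc.length < cap then acc ++ [w] else acc) acc
        = acc ++ (ws.filter (fun w => decide (p w))).take (cap - acc.length) := by
  intro ws
  induction ws with
  | nil => intro acc _; simp
  | cons w ws ih =>
    intro acc hacc
    simp only [List.foldl_cons]
    by_cases hp : p w
    · by_cases hlen : acc.length < cap
      · rw [if_pos (And.intro hp hlen), ih (acc ++ [w]) (by simp; omega)]
        have h1 : cap - acc.length = (cap - (acc.length + 1)) + 1 := by omega
        simp [hp, h1, List.take_succ_cons]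
      · rw [if_neg (fun h => hlen h.2), ih acc hacc]
        have h0 : cap - acc.length = 0 := by omega
        simp [h0]
    · rw [if_neg (fun h => hp h.1), ih acc hacc]
      simp [hp]

-- initialising fold: every bucket starts empty
theorem pvInitGetD {κ : Type} [BEq κ] [LawfulBEq κ] (ks : List κ) :
    ∀ (d : PySem.Dict κ (List String)) (c : κ), d.getD c [] = [] →
      (ks.foldl (fun d k => d.insert k ([] : List String)) d).getD c [] = [] := by
  induction ks with
  | nil => intro d c h; simpa using h
  | cons k ks ih =>
    intro d c h
    simp only [List.foldl_cons]
    apply ih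
    by_cases hk : c = k
    · subst hk; simp [PySem.Dict.getD_insert_self]
    · rw [PySem.Dict.getD_insert_of_ne] <;> simp_all

-- pushing getD through the letter-bucketing fold
theorem pvLetterFold_getD (c : Char) (hc : 'a' ≤ c ∧ c ≤ 'z') :
    ∀ (ws : List String) (d : PySem.Dict Char (List String)),
      (ws.foldl (fun d w =>
          match w.toList with
          | [] => d
          | c :: _ =>
            if ('a' ≤ c ∧ c ≤ 'z') ∧ (d.getD c []).length < 50 then
              d.insert c (d.getD c [] ++ [w])
            else d) d).getD c []
        = ws.foldl (fun acc w => if w.toList.head? = some c ∧ acc.length < 50 then acc ++ [w] else acc)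
            (d.getD c []) := by
  intro ws
  induction ws with
  | nil => intro d; rfl
  | cons w ws ih =>
    intro d
    simp only [List.foldl_cons]
    cases hw : w.toList with
    | nil => simp [ih]
    | cons c' t =>
      rw [show (match c' :: t with
          | [] => d
          | c :: _ =>
            if ('a' ≤ c ∧ c ≤ 'z') ∧ (d.getD c []).length < 50 then
              d.insert c (d.getD c [] ++ [w])
            else d)
          = if ('a' ≤ c' ∧ c' ≤ 'z') ∧ (d.getD c' []).length < 50 then
              d.insert c' (d.getD c' [] ++ [w])
            else d
        from rfl]
      by_cases hcc : c' = c
      · subst hcc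
        by_cases hlen : (d.getD c' []).length < 50
        · rw [if_pos (And.intro hc hlen), ih, PySem.Dict.getD_insert_self]
          simp [hlen]
        · rw [if_neg (fun h => hlen h.2), ih]
          simp [hlen]
      · have hne : c ≠ c' := fun h => hcc h.symm
        by_cases hC : ('a' ≤ c' ∧ c' ≤ 'z') ∧ (d.getD c' []).length < 50
        · rw [if_pos hC, ih, PySem.Dict.getD_insert_of_ne]
          · simp [hcc]
          · exact hne
        · rw [if_neg hC, ih]
          simp [hcc]

-- pushing getD through the length-bucketing fold
theorem pvLengthFold_getD (n : Int) (hn : 1 ≤ n ∧ n ≤ 15) :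
    ∀ (ws : List String) (d : PySem.Dict Int (List String)),
      (ws.foldl (fun d w =>
          let m := PySem.Str.len w
          if (1 ≤ m ∧ m ≤ 15) ∧ (d.getD m []).length < 30 then
            d.insert m (d.getD m [] ++ [w])
          else d) d).getD n []
        = ws.foldl (fun acc w => if PySem.Str.len w = n ∧ acc.length < 30 then acc ++ [w] else acc)
            (d.getD n []) := by
  intro ws
  induction ws with
  | nil => intro d; rfl
  | cons w ws ih =>
    intro d
    simp only [List.foldl_cons]
    by_cases hm : PySem.Str.len w = n
    · by_cases hlen : (d.getD n []).length < 30
      · rw [hm, if_pos (And.intro hn hlen), ih, PySem.Dict.getD_insert_self,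
            if_pos (And.intro (by simpa using hm) hlen)]
      · rw [hm, if_neg (fun h => hlen h.2), ih, if_neg (fun h => hlen h.2)]
    · have hne : n ≠ PySem.Str.len w := fun h => hm h.symm
      by_cases hC : (1 ≤ PySem.Str.len w ∧ PySem.Str.len w ≤ 15) ∧ (d.getD (PySem.Str.len w) []).length < 30
      · rw [if_pos hC, ih, PySem.Dict.getD_insert_of_ne, if_neg (fun h => hm (by simpa using h.1))]
        exact hne
      · rw [if_neg hC, ih, if_neg (fun h => hm (by simpa using h.1))]

-- startswith by a single letter tests the head character
theorem pvStartswith_singleton (w : String) (c : Char) :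
    PySem.Str.startswith w (String.ofList [c]) = decide (w.toList.head? = some c) := by
  have h : PySem.Str.startswith w (String.ofList [c]) = true ↔ w.toList.head? = some c := by
    simp only [PySem.Str.startswith_eq]
    rw [String.toList_ofList]
    rw [PySem.Chars.startswith_iff]
    cases w.toList with
    | nil => simp
    | cons a t => simp [List.cons_prefix_cons, eq_comm]
  rw [Bool.eq_iff_iff, h, decide_eq_true_eq]

-- B's letter bucket equals A's per-letter scan
theorem pvLetterBucket (words : List String) (c : Char) (hc : 'a' ≤ c ∧ c ≤ 'z') :
    (pvByLetter words).getD c []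
      = PySem.List.slice ((PySem.List.slice words none (some 10000)).filter
          (fun w => PySem.Str.startswith w (String.ofList [c]))) none (some 50) := by
  unfold pvByLetter
  rw [pvLetterFold_getD c hc]
  rw [pvInitGetD _ _ _ (by rfl)]
  rw [pvCapFold (fun w => w.toList.head? = some c) 50 _ [] (by simp)]
  rw [PySem.List.slice_to ((PySem.List.slice words none (some 10000)).filter
        (fun w => PySem.Str.startswith w (String.ofList [c]))) (by norm_num)]
  simp only [List.nil_append]
  rw [show ((50:Int)).toNat = 50 from rfl]
  congr 1
  apply List.filter_congr
  intro w _
  rw [pvStartswith_singleton]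

-- B's length bucket equals A's per-length scan
theorem pvLengthBucket (words : List String) (n : Int) (hn : 1 ≤ n ∧ n ≤ 15) :
    (pvByLength words).getD n []
      = PySem.List.slice ((PySem.List.slice words none (some 20000)).filter
          (fun w => PySem.Str.len w == n)) none (some 30) := by
  unfold pvByLength
  rw [pvLengthFold_getD n hn]
  rw [pvInitGetD _ _ _ (by rfl)]
  rw [pvCapFold (fun w => PySem.Str.len w = n) 30 _ [] (by simp)]
  rw [PySem.List.slice_to ((PySem.List.slice words none (some 20000)).filter
        (fun w => PySem.Str.len w == n)) (by norm_num)]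
  simp only [List.nil_append]
  rw [show ((30:Int)).toNat = 30 from rfl]
  congr 1

-- ===== VERDICT (by name: the statement is the Claim_ definition above) =====
theorem build_word_sections_spec : Claim_equal_build_word_sections := by
  intro words _
  unfold Spec_build_word_sections build_word_sections build_word_sections_alt
  have hc26 : ∀ c ∈ pvLetters, 'a' ≤ c ∧ c ≤ 'z' := by
    intro c hc
    fin_cases hc <;> exact ⟨by decide, by decide⟩
  have hL : ∀ init : List String,
      pvLetters.foldl (fun secs c =>
        if (pvByLetter words).getD c [] ≠ [] then
          secs ++ ["\nWords starting with " ++ PySem.Str.upper (String.ofList [c]) ++ ": " ++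
                   PySem.Str.join ", " ((pvByLetter words).getD c []) ++ ".\n"]
        else secs) init
      = pvLetters.foldl (fun secs letter =>
          let letter_words := PySem.List.slice ((PySem.List.slice words none (some 10000)).filter
              (fun w => PySem.Str.startswith w (String.ofList [letter]))) none (some 50)
          if letter_words ≠ [] then
            secs ++ ["\nWords starting with " ++ PySem.Str.upper (String.ofList [letter]) ++ ": " ++
                     PySem.Str.join ", " letter_words ++ ".\n"]
          else secs) init := by
    intro init
    apply PySem.List.foldl_congr_mem
    intro acc c hmem
    rw [pvLetterBucket words c (hc26 c hmem)]
  have hN : ∀ init : List String,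
      (PySem.List.pyRange 1 16 1).foldl (fun secs n =>
        if (pvByLength words).getD n [] ≠ [] then
          secs ++ ["\n" ++ PySem.Int.toStr n ++ "-letter words: " ++
                   PySem.Str.join ", " ((pvByLength words).getD n []) ++ ".\n"]
        else secs) init
      = (PySem.List.pyRange 1 16 1).foldl (fun secs length =>
          let length_words := PySem.List.slice ((PySem.List.slice words none (some 20000)).filter
              (fun w => PySem.Str.len w == length)) none (some 30)
          if length_words ≠ [] then
            secs ++ ["\n" ++ PySem.Int.toStr length ++ "-letter words: " ++
                     PySem.Str.join ", " length_words ++ ".\n"]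
          else secs) init := by
    intro init
    apply PySem.List.foldl_congr_mem
    intro acc n hmem
    have hn : 1 ≤ n ∧ n ≤ 15 := by
      have := (PySem.List.mem_pyRange_one).mp hmem
      omega
    rw [pvLengthBucket words n hn]
  simp only [hL, hN, List.nil_append]
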